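-- pv_equiv track=rewrite | github.com/AdamZhouSE/pythonHomework | Code/CodeRecords/2672/60734/271810.py | transform
-- ===== SOURCE A (Python) =====
-- def transform(x):
--     lst = []
--     while x>0:
--         lst.append(x&1)
--         x = x>>1
--     for i in range(len(lst)+1,33):
--         lst.append(0)
--     res = 0
--     for i in range(len(lst)):
--         if lst[i] == 0:
--             res+=2**i
--     return res
-- ===== SOURCE B (Python) =====
-- def transform(x):
--     # Closed form: 32-bit (or wider, if x needs more bits) bitwise complement.
--     if x <= 0:
--         return 2**32 - 1
--     return (2 ** max(32, x.bit_length()) - 1) - x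
-- ===== Notes on version B (the rewrite author's own statement) =====
-- stated objective: simpler
-- what changed: Replaced A's three loops (bit extraction, zero padding, weighted sum over zero bits) with a two-line closed form: non-positive x gives 2**32-1, otherwise (2**max(32, x.bit_length())-1) - x.
import Mathlib
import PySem

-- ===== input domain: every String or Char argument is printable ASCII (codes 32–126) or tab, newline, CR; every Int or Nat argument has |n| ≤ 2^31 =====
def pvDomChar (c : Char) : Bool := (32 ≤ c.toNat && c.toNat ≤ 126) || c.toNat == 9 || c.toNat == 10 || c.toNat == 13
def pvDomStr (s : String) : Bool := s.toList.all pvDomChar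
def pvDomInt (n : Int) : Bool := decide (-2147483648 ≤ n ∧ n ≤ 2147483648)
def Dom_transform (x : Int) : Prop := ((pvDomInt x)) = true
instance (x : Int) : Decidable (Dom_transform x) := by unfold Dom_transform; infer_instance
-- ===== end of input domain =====

-- B replaces A's three loops with a closed-form complement; objective: simpler.

-- termination helper for the while-loops (cited in decreasing_by)
theorem pvHalfLt (x : Int) (h : 0 < x) : (PySem.Int.floordiv x 2).toNat < x.toNat := by
  rw [PySem.Int.floordiv_eq_ediv_of_pos (by omega)]
  omega

-- ===== PORT A =====
-- while x>0: lst.append(x&1); x = x>>1      (for x>0, x&1 = x mod 2 and x>>1 = x//2: exact)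
def transLoopA (x : Int) (lst : List Int) : List Int :=
  if h : 0 < x then transLoopA (PySem.Int.floordiv x 2) (lst ++ [PySem.Int.mod x 2]) else lst
termination_by x.toNat
decreasing_by exact pvHalfLt x h

def transform (x : Int) : Int :=
  let lst := transLoopA x []
  -- for i in range(len(lst)+1,33): lst.append(0)  — appends (33 - (len+1)) zeros (Nat subtraction truncates, as range does)
  let lst := lst ++ List.replicate (33 - (lst.length + 1)) (0 : Int)
  -- res = 0; for i in range(len(lst)): if lst[i]==0: res += 2**i   (index i always in range)
  (List.range lst.length).foldl (fun res i => if lst.getD i 0 == 0 then res + 2 ^ i else res) 0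

-- ===== PORT B =====
-- x.bit_length() for x > 0 (Python: number of bits needed to represent x)
def pyBitLength (x : Int) : Nat :=
  if h : 0 < x then pyBitLength (PySem.Int.floordiv x 2) + 1 else 0
termination_by x.toNat
decreasing_by exact pvHalfLt x h

def transform_alt (x : Int) : Int :=
  if x ≤ 0 then 2 ^ 32 - 1
  else (2 ^ max 32 (pyBitLength x) - 1) - x

-- ===== PRECONDITION & SPEC =====
def Spec_transform (x : Int) (out : Int) : Prop := out = transform_alt x
instance (x : Int) (out : Int) : Decidable (Spec_transform x out) := by unfold Spec_transform; infer_instance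

-- ===== CLAIM (what is proved, stated in full; the proofs are below) =====
def Claim_equal_transform : Prop := ∀ (x : Int), Dom_transform x → Spec_transform x (transform x)

-- ===== LEMMAS AND PROOFS =====

-- proof-side model of the bit list produced by A's while loop
def bitsOf (x : Int) : List Int :=
  if h : 0 < x then PySem.Int.mod x 2 :: bitsOf (PySem.Int.floordiv x 2) else []
termination_by x.toNat
decreasing_by exact pvHalfLt x h

-- base-2 value of a (little-endian) bit list
def valOf : List Int → Int
  | [] => 0
  | b :: t => b + 2 * valOf t

-- proof-side name for A's third loop
def resOf (l : List Int) : Int :=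
  (List.range l.length).foldl (fun res i => if l.getD i 0 == 0 then res + 2 ^ i else res) 0

theorem transLoopA_eq (x : Int) : ∀ lst, transLoopA x lst = lst ++ bitsOf x := by
  induction x using bitsOf.induct with
  | case1 x h ih =>
      intro lst
      rw [transLoopA, bitsOf, dif_pos h, dif_pos h, ih]
      simp
  | case2 x h =>
      intro lst
      rw [transLoopA, bitsOf, dif_neg h, dif_neg h]
      simp

theorem bitsOf_length (x : Int) : (bitsOf x).length = pyBitLength x := by
  induction x using bitsOf.induct with
  | case1 x h ih => rw [bitsOf, pyBitLength, dif_pos h, dif_pos h]; simp only [List.length_cons, ih]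
  | case2 x h => rw [bitsOf, pyBitLength, dif_neg h, dif_neg h]; rfl

theorem bitsOf_01 (x : Int) : ∀ b ∈ bitsOf x, b = 0 ∨ b = 1 := by
  induction x using bitsOf.induct with
  | case1 x h ih =>
      rw [bitsOf, dif_pos h]
      intro b hb
      rcases List.mem_cons.1 hb with rfl | hb
      · have h1 := PySem.Int.mod_nonneg x (b := 2) (by omega)
        have h2 := PySem.Int.mod_lt x (b := 2) (by omega)
        omega
      · exact ih b hb
  | case2 x h => rw [bitsOf, dif_neg h]; simp

theorem valOf_bitsOf (x : Int) (hx : 0 ≤ x) : valOf (bitsOf x) = x := by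
  induction x using bitsOf.induct with
  | case1 x h ih =>
      rw [bitsOf, dif_pos h]
      have hd := PySem.Int.floordiv_eq_ediv_of_pos (a := x) (b := 2) (by omega)
      have hm := PySem.Int.mod_eq_emod_of_pos (a := x) (b := 2) (by omega)
      have hrec : valOf (bitsOf (PySem.Int.floordiv x 2)) = PySem.Int.floordiv x 2 := by
        apply ih; rw [hd]; omega
      simp only [valOf, hrec]
      rw [hd, hm]
      omega
  | case2 x h => rw [bitsOf, dif_neg h]; simp [valOf]; omega

theorem bitsOf_length_le (n : Nat) : ∀ x : Int, x < 2 ^ n → (bitsOf x).length ≤ n := by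
  induction n with
  | zero =>
      intro x hx
      have hx' : x < 1 := by simpa using hx
      rw [bitsOf, dif_neg (by omega)]
      simp
  | succ n ih =>
      intro x hx
      by_cases h : 0 < x
      · rw [bitsOf, dif_pos h]
        simp only [List.length_cons]
        have hd := PySem.Int.floordiv_eq_ediv_of_pos (a := x) (b := 2) (by omega)
        have : PySem.Int.floordiv x 2 < 2 ^ n := by
          rw [hd]; rw [pow_succ] at hx; omega
        exact Nat.succ_le_succ (ih _ this)
      · rw [bitsOf, dif_neg h]; simp

theorem valOf_append (l : List Int) (b : Int) :
    valOf (l ++ [b]) = valOf l + b * 2 ^ l.length := by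
  induction l with
  | nil => simp [valOf]
  | cons c t ih => simp only [List.cons_append, valOf, ih, List.length_cons, pow_succ]; ring

theorem valOf_pad (l : List Int) (k : Nat) : valOf (l ++ List.replicate k 0) = valOf l := by
  induction k generalizing l with
  | zero => simp
  | succ k ih =>
      have : l ++ List.replicate (k + 1) (0 : Int) = (l ++ [0]) ++ List.replicate k 0 := by
        simp [List.replicate_succ]
      rw [this, ih, valOf_append]
      simp

theorem resOf_append (l : List Int) (b : Int) :
    resOf (l ++ [b]) = resOf l + (if b == 0 then 2 ^ l.length else 0) := by
  unfold resOf
  rw [List.length_append, List.length_singleton, List.range_succ, List.foldl_append]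
  have h1 : (List.range l.length).foldl
      (fun res i => if (l ++ [b]).getD i 0 == 0 then res + 2 ^ i else res) (0 : Int)
      = (List.range l.length).foldl (fun res i => if l.getD i 0 == 0 then res + 2 ^ i else res) 0 := by
    apply PySem.List.foldl_congr_mem
    intro res i hi
    have : i < l.length := List.mem_range.1 hi
    rw [List.getD_append _ _ _ _ this]
  have h2 : (l ++ [b]).getD l.length 0 = b := by
    simp [List.getD_eq_getElem?_getD]
  rw [List.foldl_cons, List.foldl_nil]
  simp only [h2]
  rw [h1]
  split <;> simp

theorem resOf_complement (l : List Int) (h01 : ∀ b ∈ l, b = 0 ∨ b = 1) :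
    resOf l = 2 ^ l.length - 1 - valOf l := by
  induction l using List.reverseRecOn with
  | nil => simp [resOf, valOf]
  | append_singleton l b ih =>
      have hb : b = 0 ∨ b = 1 := h01 b (by simp)
      have hl : ∀ c ∈ l, c = 0 ∨ c = 1 := fun c hc => h01 c (by simp [hc])
      rw [resOf_append, ih hl, valOf_append, List.length_append, List.length_singleton, pow_succ]
      rcases hb with rfl | rfl <;> simp <;> ring

theorem transform_eq_closed (x : Int) (hx : 0 < x) (hb : (bitsOf x).length ≤ 32) :
    transform x = 2 ^ 32 - 1 - x := by
  unfold transform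
  rw [transLoopA_eq x []]
  simp only [List.nil_append]
  have hlen : (bitsOf x ++ List.replicate (33 - ((bitsOf x).length + 1)) (0 : Int)).length = 32 := by
    simp [List.length_append]
    omega
  have h01 : ∀ b ∈ bitsOf x ++ List.replicate (33 - ((bitsOf x).length + 1)) (0 : Int), b = 0 ∨ b = 1 := by
    intro b hbm
    rcases List.mem_append.1 hbm with h | h
    · exact bitsOf_01 x b h
    · left; exact List.eq_of_mem_replicate h
  have hres := resOf_complement _ h01
  rw [hlen] at hres
  show resOf (bitsOf x ++ List.replicate (33 - ((bitsOf x).length + 1)) (0 : Int)) = 2 ^ 32 - 1 - x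
  rw [hres, valOf_pad, valOf_bitsOf x (by omega)]

theorem transform_nonpos (x : Int) (hx : ¬ 0 < x) : transform x = 2 ^ 32 - 1 := by
  unfold transform
  rw [transLoopA_eq x [], bitsOf, dif_neg hx]
  decide

-- ===== VERDICT (by name: the statement is the Claim_ definition above) =====
theorem transform_spec : Claim_equal_transform := by
  intro x hdom
  unfold Spec_transform transform_alt
  have hdom' : -2147483648 ≤ x ∧ x ≤ 2147483648 := by
    simpa [Dom_transform, pvDomInt] using hdom
  by_cases h : 0 < x
  · have hlt : x < 2 ^ 32 := by omega
    have hble : (bitsOf x).length ≤ 32 := bitsOf_length_le 32 x hlt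
    have hmax : max 32 (pyBitLength x) = 32 := by
      have := bitsOf_length x
      omega
    rw [if_neg (by omega), hmax, transform_eq_closed x h hble]
  · rw [if_pos (by omega), transform_nonpos x h]
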